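-- pv_equiv track=rewrite | github.com/atkramer/advent-of-code-2018 | two/two.py | countTwosThrees
-- ===== SOURCE A (Python) =====
-- def exactlyN(word, n):
--   letterCounts = dict()
--   for letter in word:
--     if letter in letterCounts:
--       letterCounts[letter] += 1
--     else:
--       letterCounts[letter] = 1
--   return n in letterCounts.values()
--
-- def countTwosThrees(words):
--   twos = 0
--   threes = 0
--   for word in words:
--     if(exactlyN(word, 2)):
--       twos += 1
--     if(exactlyN(word, 3)):
--       threes += 1
--   return twos*threes
-- ===== SOURCE B (Python) =====
-- def countTwosThrees(words):
--     def run_lens(w):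
--         s = sorted(w)
--         lens = set()
--         if not s:
--             return lens
--         cur, k = s[0], 1
--         for ch in s[1:]:
--             if ch == cur:
--                 k += 1
--             else:
--                 lens.add(k)
--                 cur, k = ch, 1
--         lens.add(k)
--         return lens
--     sets = [run_lens(w) for w in words]
--     twos = sum(1 for ls in sets if 2 in ls)
--     threes = sum(1 for ls in sets if 3 in ls)
--     return twos * threes
-- ===== Notes on version B (the rewrite author's own statement) =====
-- stated objective: alternative
-- what changed: Per-word letter frequencies are derived by sorting the word and scanning run lengths (collected into a set), with the twos/threes tallies computed as two sums over the precomputed run-length sets, instead of A's hash-dictionary count accumulation per word.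
import Mathlib
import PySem

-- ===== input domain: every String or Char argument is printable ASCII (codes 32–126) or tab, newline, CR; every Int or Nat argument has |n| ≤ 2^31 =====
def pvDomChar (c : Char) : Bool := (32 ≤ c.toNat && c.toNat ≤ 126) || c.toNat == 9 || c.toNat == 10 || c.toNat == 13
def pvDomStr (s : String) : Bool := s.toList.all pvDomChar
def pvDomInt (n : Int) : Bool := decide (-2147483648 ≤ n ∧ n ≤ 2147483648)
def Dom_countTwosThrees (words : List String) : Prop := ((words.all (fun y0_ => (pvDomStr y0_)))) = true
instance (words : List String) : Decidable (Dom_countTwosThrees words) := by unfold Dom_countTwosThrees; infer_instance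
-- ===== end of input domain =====

-- B replaces A's per-word count-dictionary with sort-then-scan run lengths (simpler per-word check, two plain sums); same result.

-- ===== PORT A =====
def exactlyN (word : String) (n : Int) : Bool :=
  let d := word.toList.foldl
    (fun (d : PySem.Dict Char Int) letter =>
      if d.contains letter then d.insert letter (d.getD letter 0 + 1)
      else d.insert letter 1)
    PySem.Dict.empty
  d.values.contains n

def countTwosThrees (words : List String) : Int :=
  let r := words.foldl
    (fun (p : Int × Int) word =>
      let p := if exactlyN word 2 then (p.1 + 1, p.2) else p
      if exactlyN word 3 then (p.1, p.2 + 1) else p)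
    (0, 0)
  r.1 * r.2

-- ===== PORT B =====
-- run-length scan over the tail of the sorted word (cur = s[0], k = 1)
def pvRunLens (c : Char) (k : Nat) : List Char → List Nat
  | [] => [k]
  | x :: xs => if x = c then pvRunLens c (k + 1) xs else k :: pvRunLens x 1 xs

def pvRunSet (w : String) : PySem.Set Nat :=
  match PySem.List.sorted w.toList (fun x => x) false with
  | [] => PySem.Set.ofList []
  | x :: xs => PySem.Set.ofList (pvRunLens x 1 xs)

def countTwosThrees_alt (words : List String) : Int :=
  let sets := words.map pvRunSet
  let twos := sets.foldl (fun (acc : Int) s => if (2 : Nat) ∈ s then acc + 1 else acc) 0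
  let threes := sets.foldl (fun (acc : Int) s => if (3 : Nat) ∈ s then acc + 1 else acc) 0
  twos * threes

-- ===== PRECONDITION & SPEC =====
def Spec_countTwosThrees (words : List String) (out : Int) : Prop := out = countTwosThrees_alt words
instance (words : List String) (out : Int) : Decidable (Spec_countTwosThrees words out) := by unfold Spec_countTwosThrees; infer_instance

-- ===== CLAIM (what is proved, stated in full; the proofs are below) =====
def Claim_equal_countTwosThrees : Prop := ∀ (words : List String), Dom_countTwosThrees words → Spec_countTwosThrees words (countTwosThrees words)

-- ===== LEMMAS AND PROOFS =====

theorem exactlyN_iff (w : String) (n : Int) :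
    exactlyN w n = true ↔ ∃ c ∈ w.toList, (w.toList.count c : Int) = n := by
  have hstep : (fun (d : PySem.Dict Char Int) letter =>
      if d.contains letter then d.insert letter (d.getD letter 0 + 1)
      else d.insert letter 1)
      = fun d x => d.insert x (d.getD x 0 + 1) := by
    funext d x
    by_cases h : d.contains x = true
    · simp [h]
    · simp only [Bool.not_eq_true] at h
      simp [h, PySem.Dict.getD_of_not_contains d 0 h]
  simp only [exactlyN, hstep, PySem.Dict.foldl_insert_getD_add_one_eq_counter]
  simp only [PySem.Dict.values, PySem.Dict.items_counter]
  simp [List.mem_map, PySem.Set.mem_ofList, eq_comm]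

theorem mem_pvRunLens (n : Nat) :
    ∀ (l : List Char) (c : Char) (k : Nat), (c :: l).Pairwise (· ≤ ·) →
      (n ∈ pvRunLens c k l ↔ (n = k + l.count c ∨ ∃ x ∈ l, x ≠ c ∧ l.count x = n)) := by
  intro l
  induction l with
  | nil => intro c k _; simp [pvRunLens]
  | cons x xs ih =>
    intro c k hp
    have hcx : c ≤ x := (List.pairwise_cons.1 hp).1 x (by simp)
    have hpx : (x :: xs).Pairwise (· ≤ ·) := (List.pairwise_cons.1 hp).2
    by_cases hxc : x = c
    · subst hxc
      rw [pvRunLens, if_pos rfl, ih x (k + 1) hpx]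
      constructor
      · rintro (h | ⟨y, hy, hyx, hc⟩)
        · left; simp; omega
        · right; exact ⟨y, by simp [hy], hyx, by simp [Ne.symm hyx] at hc ⊢; omega⟩
      · rintro (h | ⟨y, hy, hyc, hc⟩)
        · left; simp at h; omega
        · rcases List.mem_cons.1 hy with rfl | hy'
          · exact absurd rfl hyc
          · right; exact ⟨y, hy', hyc, by simp [Ne.symm hyc] at hc ⊢; omega⟩
    · have hlt : c < x := lt_of_le_of_ne hcx (fun h => hxc h.symm)
      have hgt : ∀ y ∈ x :: xs, c < y := by
        intro y hy
        rcases List.mem_cons.1 hy with rfl | hy'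
        · exact hlt
        · exact lt_of_lt_of_le hlt ((List.pairwise_cons.1 hpx).1 y hy')
      have hcount0 : (x :: xs).count c = 0 := by
        rw [List.count_eq_zero]
        intro hc; exact absurd rfl (ne_of_gt (hgt c hc))
      rw [pvRunLens, if_neg hxc]
      simp only [List.mem_cons]
      rw [ih x 1 hpx]
      constructor
      · rintro (rfl | h | ⟨y, hy, hyx, hc⟩)
        · left; omega
        · right
          exact ⟨x, Or.inl rfl, hxc, by simp at h ⊢; omega⟩
        · right
          refine ⟨y, Or.inr hy, ne_of_gt (hgt y (by simp [hy])), ?_⟩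
          simp [Ne.symm hyx]; omega
      · rintro (h | ⟨y, hy, hyc, hc⟩)
        · left; omega
        · rcases hy with rfl | hy'
          · right; left
            simp at hc ⊢; omega
          · by_cases hyx : y = x
            · subst hyx
              right; left
              simp at hc ⊢; omega
            · right; right
              exact ⟨y, hy', hyx, by simp [Ne.symm hyx] at hc ⊢; omega⟩

theorem mem_pvRunSet (w : String) (n : Nat) :
    n ∈ pvRunSet w ↔ ∃ c ∈ w.toList, w.toList.count c = n := by
  unfold pvRunSet
  have hperm : (PySem.List.sorted w.toList (fun x => x) false).Perm w.toList :=
    PySem.List.sorted_perm w.toList (fun x => x) false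
  have hpw : (PySem.List.sorted w.toList (fun x => x) false).Pairwise (· ≤ ·) := by
    simpa using PySem.List.sorted_pairwise w.toList (fun x => x)
  rcases hs : PySem.List.sorted w.toList (fun x => x) false with _ | ⟨x, xs⟩
  · simp [PySem.Set.ofList]
    intro c hc
    have := hperm.mem_iff (a := c)
    rw [hs] at this hperm
    exact absurd ((hperm.symm.mem_iff).1 hc) (by simp)
  · rw [hs] at hperm hpw
    rw [PySem.Set.mem_ofList, mem_pvRunLens n xs x 1 hpw]
    constructor
    · rintro (h | ⟨y, hy, hyx, hc⟩)
      · refine ⟨x, hperm.mem_iff.1 (by simp), ?_⟩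
        rw [← hperm.count_eq]
        simp; omega
      · refine ⟨y, hperm.mem_iff.1 (by simp [hy]), ?_⟩
        rw [← hperm.count_eq]
        simp [Ne.symm hyx]; omega
    · rintro ⟨c, hc, hcount⟩
      rw [← hperm.count_eq] at hcount
      rcases List.mem_cons.1 (hperm.mem_iff.2 hc) with rfl | hc'
      · left; simp at hcount; omega
      · by_cases hcx : c = x
        · subst hcx; left; simp at hcount; omega
        · right; exact ⟨c, hc', hcx, by simp [Ne.symm hcx] at hcount ⊢; omega⟩

theorem exactlyN_eq_mem (w : String) (m : Nat) :
    exactlyN w (m : Int) = decide ((m : Nat) ∈ pvRunSet w) := by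
  have h : exactlyN w (m : Int) = true ↔ (m : Nat) ∈ pvRunSet w := by
    rw [exactlyN_iff, mem_pvRunSet w m]
    constructor
    · rintro ⟨c, hc, h⟩; exact ⟨c, hc, by exact_mod_cast h⟩
    · rintro ⟨c, hc, h⟩; exact ⟨c, hc, by exact_mod_cast h⟩
  rcases Bool.eq_false_or_eq_true (exactlyN w (m : Int)) with hb | hb <;>
    simp [hb] at h ⊢ <;> simp [h]

-- ===== VERDICT (by name: the statement is the Claim_ definition above) =====
theorem countTwosThrees_spec : Claim_equal_countTwosThrees := by
  intro words _
  unfold Spec_countTwosThrees countTwosThrees countTwosThrees_alt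
  have hstep : (fun (p : Int × Int) word =>
      let p := if exactlyN word 2 then (p.1 + 1, p.2) else p
      if exactlyN word 3 then (p.1, p.2 + 1) else p)
      = fun (p : Int × Int) word =>
        ((if (2 : Nat) ∈ pvRunSet word then p.1 + 1 else p.1),
         (if (3 : Nat) ∈ pvRunSet word then p.2 + 1 else p.2)) := by
    funext p word
    have h2 := exactlyN_eq_mem word 2
    have h3 := exactlyN_eq_mem word 3
    norm_num at h2 h3
    by_cases e2 : (2 : Nat) ∈ pvRunSet word <;> by_cases e3 : (3 : Nat) ∈ pvRunSet word <;>
      simp [h2, h3, e2, e3]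
  rw [hstep,
    PySem.List.foldl_prod_mk (f := fun (a : Int) word => if (2 : Nat) ∈ pvRunSet word then a + 1 else a)
      (g := fun (b : Int) word => if (3 : Nat) ∈ pvRunSet word then b + 1 else b)]
  simp [List.foldl_map]
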